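-- pv_equiv track=rewrite | github.com/currentlycrafting/messagebox | src/app.py | parse_uploaded_csv_rows
-- ===== SOURCE A (Python) =====
-- from typing import Any
--
-- def get_first_non_empty_value(row: dict[str, Any], candidate_keys: list[str]) -> str:
--     """
--     Return the first non-empty string value from a CSV row for a list of keys.
--     """
--     for key in candidate_keys:
--         if key in row:
--             raw_value = row[key]
--             text_value = str(raw_value).strip()
--             if text_value:
--                 return text_value
--     return ""
--
-- def parse_uploaded_csv_rows(rows: list[dict[str, Any]]) -> list[dict[str, str]]:
--     """
--     Convert CSV DictReader rows into a normalized list of watched movies.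
--     """
--     parsed_movies: list[dict[str, str]] = []
--
--     for row in rows:
--         movie_name = get_first_non_empty_value(row, ["Name", "name", "Movie", "movie", "Title", "title"])
--         movie_year = get_first_non_empty_value(row, ["Year", "year"])
--         movie_rating = get_first_non_empty_value(row, ["Rating", "rating", "Stars", "stars", "Score", "score"])
--         watched_date = get_first_non_empty_value(row, ["Date", "date"])
--         letterboxd_uri = get_first_non_empty_value(row, ["Letterboxd URI", "letterboxd_uri"])
--
--         parsed_movies.append(
--             {
--                 "date": watched_date,
--                 "name": movie_name,
--                 "year": movie_year,
--                 "rating": movie_rating,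
--                 "letterboxd_uri": letterboxd_uri,
--             }
--         )
--
--     return parsed_movies
-- ===== SOURCE B (Python) =====
-- from typing import Any
--
-- _FIELDS = ["date", "name", "year", "rating", "letterboxd_uri"]
--
-- # reverse lookup: candidate column name -> (output field, priority rank)
-- _REVERSE: dict[str, tuple[str, int]] = {}
-- for _field, _keys in [
--     ("name", ["Name", "name", "Movie", "movie", "Title", "title"]),
--     ("year", ["Year", "year"]),
--     ("rating", ["Rating", "rating", "Stars", "stars", "Score", "score"]),
--     ("date", ["Date", "date"]),
--     ("letterboxd_uri", ["Letterboxd URI", "letterboxd_uri"]),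
-- ]:
--     for _rank, _key in enumerate(_keys):
--         _REVERSE[_key] = (_field, _rank)
--
-- def parse_uploaded_csv_rows(rows: list[dict[str, Any]]) -> list[dict[str, str]]:
--     """Single scan over each row's columns, dispatching through a reverse map."""
--     movies: list[dict[str, str]] = []
--     for row in rows:
--         best: dict[str, tuple[int, str]] = {}  # field -> (rank, text)
--         for key, value in row.items():
--             hit = _REVERSE.get(key)
--             if hit is None:
--                 continue
--             field, rank = hit
--             text = str(value).strip()
--             if text and (field not in best or rank < best[field][0]):
--                 best[field] = (rank, text)
--         movies.append({f: best[f][1] if f in best else "" for f in _FIELDS})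
--     return movies
-- ===== Notes on version B (the rewrite author's own statement) =====
-- stated objective: alternative
-- what changed: Replaces A's per-field probing of 18 candidate keys against each row with a single pass over the row's columns dispatched through a precomputed reverse-lookup map (candidate key -> (field, priority rank)), keeping the best-ranked non-empty value per field.
import Mathlib
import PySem

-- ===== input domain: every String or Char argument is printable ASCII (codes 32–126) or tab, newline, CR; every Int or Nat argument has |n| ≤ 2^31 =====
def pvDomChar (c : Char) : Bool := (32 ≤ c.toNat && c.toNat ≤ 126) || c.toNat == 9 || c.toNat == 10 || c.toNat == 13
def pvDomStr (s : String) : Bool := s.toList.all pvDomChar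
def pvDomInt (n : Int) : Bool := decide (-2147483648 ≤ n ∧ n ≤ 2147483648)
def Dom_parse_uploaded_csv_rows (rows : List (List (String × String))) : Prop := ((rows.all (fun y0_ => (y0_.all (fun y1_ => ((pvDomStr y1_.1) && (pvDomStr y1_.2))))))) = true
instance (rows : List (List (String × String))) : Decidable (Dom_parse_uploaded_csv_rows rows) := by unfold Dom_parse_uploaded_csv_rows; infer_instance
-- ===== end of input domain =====

-- B replaces A's per-field probing of 18 candidate keys with a single scan over the row's
-- columns dispatched through a reverse-lookup map (candidate key -> (field, rank)); same results.

-- ===== PORT A =====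
def get_first_non_empty_value (row : List (String × String)) (candidate_keys : List String) : String :=
  match candidate_keys with
  | [] => ""
  | key :: rest =>
    match (PySem.Dict.mk row).get? key with
    | some raw_value =>
      let text_value := PySem.Str.strip raw_value
      if text_value ≠ "" then text_value else get_first_non_empty_value row rest
    | none => get_first_non_empty_value row rest

def parse_uploaded_csv_rows (rows : List (List (String × String))) : List (List (String × String)) :=
  rows.foldl (fun parsed_movies row =>
    let movie_name := get_first_non_empty_value row ["Name", "name", "Movie", "movie", "Title", "title"]
    let movie_year := get_first_non_empty_value row ["Year", "year"]
    let movie_rating := get_first_non_empty_value row ["Rating", "rating", "Stars", "stars", "Score", "score"]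
    let watched_date := get_first_non_empty_value row ["Date", "date"]
    let letterboxd_uri := get_first_non_empty_value row ["Letterboxd URI", "letterboxd_uri"]
    parsed_movies ++ [[("date", watched_date), ("name", movie_name), ("year", movie_year),
                       ("rating", movie_rating), ("letterboxd_uri", letterboxd_uri)]]) []

-- ===== PORT B =====
def pvReverseList : List (String × (String × Int)) :=
  [("Name", ("name", 0)), ("name", ("name", 1)), ("Movie", ("name", 2)), ("movie", ("name", 3)),
   ("Title", ("name", 4)), ("title", ("name", 5)),
   ("Year", ("year", 0)), ("year", ("year", 1)),
   ("Rating", ("rating", 0)), ("rating", ("rating", 1)), ("Stars", ("rating", 2)),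
   ("stars", ("rating", 3)), ("Score", ("rating", 4)), ("score", ("rating", 5)),
   ("Date", ("date", 0)), ("date", ("date", 1)),
   ("Letterboxd URI", ("letterboxd_uri", 0)), ("letterboxd_uri", ("letterboxd_uri", 1))]

def pvReverse : PySem.Dict String (String × Int) := PySem.Dict.mk pvReverseList

def pvFields : List String := ["date", "name", "year", "rating", "letterboxd_uri"]

def pvRowStep (best : PySem.Dict String (Int × String)) (kv : String × String) :
    PySem.Dict String (Int × String) :=
  match pvReverse.get? kv.1 with
  | none => best
  | some (field, rank) =>
    let text := PySem.Str.strip kv.2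
    match best.get? field with
    | none => if text ≠ "" then best.insert field (rank, text) else best
    | some (r, _) => if text ≠ "" ∧ rank < r then best.insert field (rank, text) else best

-- best[f][1] if f in best else ""
def pvBestVal (best : PySem.Dict String (Int × String)) (f : String) : String :=
  match best.get? f with
  | some (_, t) => t
  | none => ""

def parse_uploaded_csv_rows_alt (rows : List (List (String × String))) : List (List (String × String)) :=
  rows.map (fun row =>
    let best := row.foldl pvRowStep PySem.Dict.empty
    pvFields.map (fun f => (f, pvBestVal best f)))

-- ===== PRECONDITION & SPEC =====
-- Pre_ excludes rows whose association list repeats a key: a Python dict (a DictReader row)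
-- can never hold duplicate keys, so A's first-match lookup there is an artefact of the encoding.
def Pre_parse_uploaded_csv_rows (rows : List (List (String × String))) : Prop :=
  ∀ row ∈ rows, (row.map Prod.fst).Nodup
instance (rows : List (List (String × String))) : Decidable (Pre_parse_uploaded_csv_rows rows) := by
  unfold Pre_parse_uploaded_csv_rows; infer_instance

def pvWitness_parse_uploaded_csv_rows : (List (List (String × String))) :=
  [[("Name", " Up "), ("junk", "z"), ("Year", "2009")], [("title", "Heat")]]

def Spec_parse_uploaded_csv_rows (rows : List (List (String × String))) (out : List (List (String × String))) : Prop := out = parse_uploaded_csv_rows_alt rows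
instance (rows : List (List (String × String))) (out : List (List (String × String))) : Decidable (Spec_parse_uploaded_csv_rows rows out) := by unfold Spec_parse_uploaded_csv_rows; infer_instance

-- ===== CLAIM (what is proved, stated in full; the proofs are below) =====
def Claim_equal_parse_uploaded_csv_rows : Prop := ∀ (rows : List (List (String × String))), Dom_parse_uploaded_csv_rows rows → Pre_parse_uploaded_csv_rows rows → Spec_parse_uploaded_csv_rows rows (parse_uploaded_csv_rows rows)

-- ===== LEMMAS AND PROOFS =====

-- abbreviation used by the proofs: value of an optional (rank, text) best hit
def pvOutOf : Option (Int × String) → String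
  | some (_, t) => t
  | none => ""

-- the per-field trace of B's fold: how the best hit for field f evolves over the row items
def pvBHit (f : String) : List (String × String) → Option (Int × String) → Option (Int × String)
  | [], acc => acc
  | kv :: rest, acc =>
    pvBHit f rest
      (match pvReverse.get? kv.1 with
       | none => acc
       | some (g, rank) =>
         let text := PySem.Str.strip kv.2
         if g = f then
           match acc with
           | none => if text ≠ "" then some (rank, text) else acc
           | some (r, _) => if text ≠ "" ∧ rank < r then some (rank, text) else acc
         else acc)

-- A's probe with an explicit default
def pvGfd (row : List (String × String)) : List String → String → String
  | [], d => d
  | k :: ks, d =>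
    match (PySem.Dict.mk row).get? k with
    | some v => if PySem.Str.strip v ≠ "" then PySem.Str.strip v else pvGfd row ks d
    | none => pvGfd row ks d

-- a candidate list cs matches field f in the reverse map
def pvGood (f : String) (cs : List String) : Prop :=
  cs.Nodup ∧
  (∀ i : Nat, (h : i < cs.length) → pvReverse.get? cs[i] = some (f, (i : Int))) ∧
  (∀ p ∈ pvReverseList, p.2.1 = f → ∃ i : Nat, ∃ h : i < cs.length, p.2.2 = (i : Int) ∧ cs[i] = p.1)

lemma pvGood_name : pvGood "name" ["Name", "name", "Movie", "movie", "Title", "title"] := by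
  unfold pvGood; refine ⟨by decide, by decide, by decide⟩
lemma pvGood_year : pvGood "year" ["Year", "year"] := by
  unfold pvGood; refine ⟨by decide, by decide, by decide⟩
lemma pvGood_rating : pvGood "rating" ["Rating", "rating", "Stars", "stars", "Score", "score"] := by
  unfold pvGood; refine ⟨by decide, by decide, by decide⟩
lemma pvGood_date : pvGood "date" ["Date", "date"] := by
  unfold pvGood; refine ⟨by decide, by decide, by decide⟩
lemma pvGood_uri : pvGood "letterboxd_uri" ["Letterboxd URI", "letterboxd_uri"] := by
  unfold pvGood; refine ⟨by decide, by decide, by decide⟩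

lemma pvGfd_eq_get_first (row : List (String × String)) (cs : List String) :
    pvGfd row cs "" = get_first_non_empty_value row cs := by
  induction cs with
  | nil => rfl
  | cons k ks ih =>
    simp only [pvGfd, get_first_non_empty_value]
    cases (PySem.Dict.mk row).get? k with
    | none => exact ih
    | some v => simp only []; split <;> simp_all

lemma pvFold_get? (f : String) (l : List (String × String)) :
    ∀ best : PySem.Dict String (Int × String),
      (l.foldl pvRowStep best).get? f = pvBHit f l (best.get? f) := by
  induction l with
  | nil => intro best; rfl
  | cons kv rest ih =>
    intro best
    simp only [List.foldl_cons, pvBHit]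
    rw [ih]
    congr 1
    simp only [pvRowStep]
    cases hrev : pvReverse.get? kv.1 with
    | none => rfl
    | some gr =>
      obtain ⟨g, rank⟩ := gr
      simp only []
      by_cases hgf : g = f
      · subst hgf
        cases hb : best.get? g with
        | none =>
          simp only [hb]
          split
          · simp [PySem.Dict.get?_insert_self]
          · simp [hb]
        | some p =>
          obtain ⟨r, t⟩ := p
          simp only [hb]
          split
          · simp [PySem.Dict.get?_insert_self]
          · simp [hb]
      · have hne : f ≠ g := fun he => hgf he.symm
        cases hb : best.get? g with
        | none =>
          simp only [if_neg hgf]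
          split
          · rw [PySem.Dict.get?_insert_of_ne _ _ hne]
          · rfl
        | some p =>
          obtain ⟨r, t⟩ := p
          simp only [if_neg hgf]
          split
          · rw [PySem.Dict.get?_insert_of_ne _ _ hne]
          · rfl

lemma pvGfd_nil (ks : List String) (d : String) : pvGfd [] ks d = d := by
  induction ks with
  | nil => rfl
  | cons k ks ih => simpa [pvGfd] using ih

lemma pvGfd_append (row : List (String × String)) (xs ys : List String) (d : String) :
    pvGfd row (xs ++ ys) d = pvGfd row xs (pvGfd row ys d) := by
  induction xs with
  | nil => rfl
  | cons k ks ih =>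
    simp only [List.cons_append, pvGfd]
    cases (PySem.Dict.mk row).get? k with
    | none => exact ih
    | some v => simp only []; split <;> simp_all

lemma pvGfd_cons_not_mem (kv : String × String) (rest : List (String × String))
    (ks : List String) (d : String) (h : kv.1 ∉ ks) :
    pvGfd (kv :: rest) ks d = pvGfd rest ks d := by
  induction ks with
  | nil => rfl
  | cons k ks ih =>
    have hk : kv.1 ≠ k := by intro he; exact h (by simp [he])
    have hks : kv.1 ∉ ks := fun hm => h (List.mem_cons_of_mem _ hm)
    have hget : (PySem.Dict.mk (kv :: rest)).get? k = (PySem.Dict.mk rest).get? k := by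
      rw [PySem.Dict.get?_mk_cons]
      simp [beq_iff_eq, hk]
    simp only [pvGfd, hget]
    cases (PySem.Dict.mk rest).get? k with
    | none => exact ih hks
    | some v => simp only []; split <;> simp_all

lemma pvGfd_skip_none (row : List (String × String)) (k : String) (ks : List String) (d : String)
    (h : (PySem.Dict.mk row).get? k = none) :
    pvGfd row (k :: ks) d = pvGfd row ks d := by
  simp [pvGfd, h]

lemma pvNotMemTake (cs : List String) (i m : Nat) (h : i < cs.length) (hnd : cs.Nodup)
    (him : m ≤ i) : cs[i] ∉ cs.take m := by
  intro hmem
  obtain ⟨j, hj, hje⟩ := List.getElem_of_mem hmem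
  rw [List.getElem_take] at hje
  have hjm : j < m := by simpa using lt_of_lt_of_le hj (by simp [List.length_take])
  have : j = i := (List.Nodup.getElem_inj_iff hnd).1 hje
  omega

lemma pvNotMemDrop (cs : List String) (i : Nat) (h : i < cs.length) (hnd : cs.Nodup) :
    cs[i] ∉ cs.drop (i + 1) := by
  intro hmem
  obtain ⟨j, hj, hje⟩ := List.getElem_of_mem hmem
  rw [List.getElem_drop] at hje
  have : i + 1 + j = i := (List.Nodup.getElem_inj_iff hnd).1 hje
  omega

lemma pvNotMemCands (f : String) (cs : List String) (hg : pvGood f cs) (k : String)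
    (hk : ∀ r : Int, pvReverse.get? k ≠ some (f, r)) : k ∉ cs := by
  intro hmem
  obtain ⟨j, hj, hje⟩ := List.getElem_of_mem hmem
  exact hk (j : Int) (hje ▸ hg.2.1 j hj)

lemma pvGetNone (row : List (String × String)) (k : String) (h : k ∉ row.map Prod.fst) :
    (PySem.Dict.mk row).get? k = none := by
  rw [PySem.Dict.get?_eq_none_iff_not_mem_keys]
  simpa [PySem.Dict.keys_mk] using h

lemma pvGfd_peel (kv : String × String) (rest : List (String × String)) (cs : List String)
    (i : Nat) (h : i < cs.length) (hk : cs[i] = kv.1) (hnd : cs.Nodup)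
    (_hnone : (PySem.Dict.mk rest).get? kv.1 = none) (d : String) :
    pvGfd (kv :: rest) cs d =
      pvGfd rest (cs.take i)
        (if PySem.Str.strip kv.2 ≠ "" then PySem.Str.strip kv.2
         else pvGfd rest (cs.drop (i + 1)) d) := by
  conv_lhs => rw [← List.take_append_drop i cs]
  rw [List.drop_eq_getElem_cons h, pvGfd_append]
  have hsome : (PySem.Dict.mk (kv :: rest)).get? cs[i] = some kv.2 := by
    rw [hk, PySem.Dict.get?_mk_cons]; simp
  have hdrop : pvGfd (kv :: rest) (cs.drop (i + 1)) d = pvGfd rest (cs.drop (i + 1)) d :=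
    pvGfd_cons_not_mem _ _ _ _ (by rw [← hk]; exact pvNotMemDrop cs i h hnd)
  rw [pvGfd_cons_not_mem _ _ _ _ (by rw [← hk]; exact pvNotMemTake cs i i h hnd le_rfl)]
  congr 1
  simp only [pvGfd, hsome]
  rw [hdrop]

lemma pvGfd_absent (rest : List (String × String)) (cs : List String) (i : Nat)
    (h : i < cs.length) (hnone : (PySem.Dict.mk rest).get? cs[i] = none) (d : String) :
    pvGfd rest cs d = pvGfd rest (cs.take i) (pvGfd rest (cs.drop (i + 1)) d) := by
  conv_lhs => rw [← List.take_append_drop i cs]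
  rw [List.drop_eq_getElem_cons h, pvGfd_append, pvGfd_skip_none _ _ _ _ hnone]

lemma pvRev_mem (k : String) (v : String × Int) (h : pvReverse.get? k = some v) :
    (k, v) ∈ pvReverseList :=
  PySem.Dict.mem_items_of_get?_eq_some _ h

lemma pvMain (f : String) (cs : List String) (hg : pvGood f cs) :
    ∀ (l : List (String × String)) (acc : Option (Int × String)),
      (l.map Prod.fst).Nodup →
      pvOutOf (pvBHit f l acc) =
        (match acc with
         | none => pvGfd l cs ""
         | some (r, t) => pvGfd l (cs.take r.toNat) t) := by
  obtain ⟨hcnd, hcand, hrevc⟩ := hg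
  intro l
  induction l with
  | nil =>
    intro acc _
    cases acc with
    | none => simp [pvBHit, pvOutOf, pvGfd_nil]
    | some p => obtain ⟨r, t⟩ := p; simp [pvBHit, pvOutOf, pvGfd_nil]
  | cons kv rest ih =>
    intro acc hnd
    rw [List.map_cons, List.nodup_cons] at hnd
    obtain ⟨hk1, hnd'⟩ := hnd
    have hnone : (PySem.Dict.mk rest).get? kv.1 = none := pvGetNone _ _ hk1
    simp only [pvBHit]
    cases hrev : pvReverse.get? kv.1 with
    | none =>
      have hnm : kv.1 ∉ cs :=
        pvNotMemCands f cs ⟨hcnd, hcand, hrevc⟩ kv.1 (fun r hr => by rw [hrev] at hr; cases hr)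
      rw [ih _ hnd']
      cases acc with
      | none => exact (pvGfd_cons_not_mem kv rest cs "" hnm).symm
      | some p =>
        obtain ⟨r, t⟩ := p
        exact (pvGfd_cons_not_mem kv rest _ t
          (fun hm => hnm (List.mem_of_mem_take hm))).symm
    | some gr =>
      obtain ⟨g, rank⟩ := gr
      simp only []
      by_cases hgf : g = f
      · subst hgf
        rw [if_pos rfl]
        obtain ⟨i, h, hri, hk⟩ := hrevc _ (pvRev_mem _ _ hrev) rfl
        simp only at hri hk
        subst hri
        have htoNat : ((i : Int)).toNat = i := by omega
        cases acc with
        | none =>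
          by_cases htext : PySem.Str.strip kv.2 ≠ ""
          · rw [if_pos htext, ih _ hnd']
            simp only [htoNat]
            rw [pvGfd_peel kv rest cs i h hk hcnd hnone "", if_pos htext]
          · rw [if_neg htext, ih _ hnd']
            rw [pvGfd_peel kv rest cs i h hk hcnd hnone "", if_neg htext]
            exact pvGfd_absent rest cs i h (hk ▸ hnone) ""
        | some p =>
          obtain ⟨ra, ta⟩ := p
          simp only []
          by_cases hcond : PySem.Str.strip kv.2 ≠ "" ∧ (i : Int) < ra
          · rw [if_pos hcond, ih _ hnd']
            simp only [htoNat]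
            have him : i < ra.toNat := by omega
            have hlen : i < (cs.take ra.toNat).length := by simp [List.length_take]; omega
            have hk' : (cs.take ra.toNat)[i] = kv.1 := by rw [List.getElem_take]; exact hk
            have hnd'' : (cs.take ra.toNat).Nodup := (List.take_sublist _ _).nodup hcnd
            rw [pvGfd_peel kv rest (cs.take ra.toNat) i hlen hk' hnd'' hnone ta,
                if_pos hcond.1, List.take_take]
            have hmin : min i ra.toNat = i := by omega
            rw [hmin]
          · rw [if_neg hcond, ih _ hnd']
            by_cases him : i < ra.toNat
            · have htext : ¬ PySem.Str.strip kv.2 ≠ "" := by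
                intro ht; exact hcond ⟨ht, by omega⟩
              have hlen : i < (cs.take ra.toNat).length := by simp [List.length_take]; omega
              have hk' : (cs.take ra.toNat)[i] = kv.1 := by rw [List.getElem_take]; exact hk
              have hnd'' : (cs.take ra.toNat).Nodup := (List.take_sublist _ _).nodup hcnd
              rw [pvGfd_peel kv rest (cs.take ra.toNat) i hlen hk' hnd'' hnone ta,
                  if_neg htext]
              exact pvGfd_absent rest (cs.take ra.toNat) i hlen (hk' ▸ hnone) ta
            · exact (pvGfd_cons_not_mem kv rest _ ta
                (by rw [← hk]; exact pvNotMemTake cs i ra.toNat h hcnd (by omega))).symm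
      · have hnm : kv.1 ∉ cs :=
          pvNotMemCands f cs ⟨hcnd, hcand, hrevc⟩ kv.1
            (fun r hr => by rw [hrev] at hr; exact hgf (congrArg (fun q => q.1) (Option.some.inj hr)))
        rw [if_neg hgf, ih _ hnd']
        cases acc with
        | none => exact (pvGfd_cons_not_mem kv rest cs "" hnm).symm
        | some p =>
          obtain ⟨r, t⟩ := p
          exact (pvGfd_cons_not_mem kv rest _ t
            (fun hm => hnm (List.mem_of_mem_take hm))).symm

lemma pvField (f : String) (cs : List String) (hg : pvGood f cs)
    (row : List (String × String)) (hnd : (row.map Prod.fst).Nodup) :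
    pvOutOf (pvBHit f row none) = get_first_non_empty_value row cs := by
  have := pvMain f cs hg row none hnd
  simpa [pvGfd_eq_get_first] using this

lemma pvBestVal_eq (best : PySem.Dict String (Int × String)) (f : String) :
    pvBestVal best f = pvOutOf (best.get? f) := by
  unfold pvBestVal pvOutOf
  cases best.get? f with
  | none => rfl
  | some p => obtain ⟨r, t⟩ := p; rfl

lemma pvRow_eq (row : List (String × String)) (hnd : (row.map Prod.fst).Nodup) :
    pvFields.map (fun f => (f, pvBestVal (row.foldl pvRowStep PySem.Dict.empty) f)) =
      [("date", get_first_non_empty_value row ["Date", "date"]),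
       ("name", get_first_non_empty_value row ["Name", "name", "Movie", "movie", "Title", "title"]),
       ("year", get_first_non_empty_value row ["Year", "year"]),
       ("rating", get_first_non_empty_value row ["Rating", "rating", "Stars", "stars", "Score", "score"]),
       ("letterboxd_uri", get_first_non_empty_value row ["Letterboxd URI", "letterboxd_uri"])] := by
  have hb : ∀ f : String,
      pvBestVal (row.foldl pvRowStep PySem.Dict.empty) f = pvOutOf (pvBHit f row none) := by
    intro f
    rw [pvBestVal_eq, pvFold_get?, PySem.Dict.get?_empty]
  simp only [pvFields, List.map_cons, List.map_nil, hb]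
  rw [pvField _ _ pvGood_date row hnd, pvField _ _ pvGood_name row hnd,
      pvField _ _ pvGood_year row hnd, pvField _ _ pvGood_rating row hnd,
      pvField _ _ pvGood_uri row hnd]

-- ===== VERDICT (by name: the statement is the Claim_ definition above) =====
theorem parse_uploaded_csv_rows_spec : Claim_equal_parse_uploaded_csv_rows := by
  intro rows _ hpre
  unfold Spec_parse_uploaded_csv_rows parse_uploaded_csv_rows parse_uploaded_csv_rows_alt
  rw [PySem.List.foldl_append_singleton_eq_map
        (fun row => [("date", get_first_non_empty_value row ["Date", "date"]),
                     ("name", get_first_non_empty_value row ["Name", "name", "Movie", "movie", "Title", "title"]),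
                     ("year", get_first_non_empty_value row ["Year", "year"]),
                     ("rating", get_first_non_empty_value row ["Rating", "rating", "Stars", "stars", "Score", "score"]),
                     ("letterboxd_uri", get_first_non_empty_value row ["Letterboxd URI", "letterboxd_uri"])])
        rows []]
  simp only [List.nil_append]
  exact (List.map_congr_left (fun row hrow => pvRow_eq row (hpre row hrow))).symm
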